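-- pv_equiv track=rewrite | github.com/Wulfic/Cicada3301 | LiberPrimus/tools/word_level_analysis.py | count_effective_letters
-- ===== SOURCE A (Python) =====
-- def count_effective_letters(text):
--     """Count rune-equivalent characters in decoded text"""
--     text = text.upper()
--     count = 0
--     i = 0
--     while i < len(text):
--         if i < len(text) - 1:
--             digraph = text[i:i+2]
--             if digraph in ['TH', 'EO', 'NG', 'OE', 'AE', 'IA', 'IO', 'EA']:
--                 count += 1
--                 i += 2
--                 continue
--         count += 1
--         i += 1
--     return count
-- ===== SOURCE B (Python) =====
-- import re
--
-- _DIGRAPH_RE = re.compile(r'TH|EO|NG|OE|AE|IA|IO|EA')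
--
-- def count_effective_letters(text):
--     """Count rune-equivalent characters in decoded text"""
--     text = text.upper()
--     return len(text) - len(_DIGRAPH_RE.findall(text))
-- ===== Notes on version B (the rewrite author's own statement) =====
-- stated objective: faster
-- what changed: Replaces the explicit index loop that counts tokens one by one with a single compiled-regex findall that counts the greedy non-overlapping digraph matches and subtracts that from the text length.
import Mathlib
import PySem

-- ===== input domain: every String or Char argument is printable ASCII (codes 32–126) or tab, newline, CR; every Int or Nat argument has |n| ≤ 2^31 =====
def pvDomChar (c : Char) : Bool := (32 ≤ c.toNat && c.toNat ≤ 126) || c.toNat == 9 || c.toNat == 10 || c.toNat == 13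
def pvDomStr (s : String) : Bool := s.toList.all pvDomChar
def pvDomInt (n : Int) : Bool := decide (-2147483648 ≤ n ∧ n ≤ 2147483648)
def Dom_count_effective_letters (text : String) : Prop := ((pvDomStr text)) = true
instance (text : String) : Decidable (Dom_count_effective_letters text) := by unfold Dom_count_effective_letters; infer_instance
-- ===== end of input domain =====

-- B replaces A's index loop (counting tokens) by a regex count of the greedy non-overlapping
-- digraph matches subtracted from the text length; same value, no speed claim.

-- the digraph test both programs use (on the uppercased text)
def pvIsDigraph (a b : Char) : Bool :=
  (a == 'T' && b == 'H') || (a == 'E' && b == 'O') || (a == 'N' && b == 'G') ||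
  (a == 'O' && b == 'E') || (a == 'A' && b == 'E') || (a == 'I' && b == 'A') ||
  (a == 'I' && b == 'O') || (a == 'E' && b == 'A')

-- ===== PORT A =====
-- A's while loop over the uppercased text: at each position, if two chars remain and they
-- form a digraph, count 1 and advance by 2; otherwise count 1 and advance by 1.
def pvLoopA : List Char → Int → Int
  | a :: b :: rest, count =>
      if pvIsDigraph a b then pvLoopA rest (count + 1) else pvLoopA (b :: rest) (count + 1)
  | [_], count => count + 1
  | [], count => count

def count_effective_letters (text : String) : Int :=
  pvLoopA (PySem.Str.upper text).toList 0

-- ===== PORT B =====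
-- re.findall(r'TH|EO|NG|OE|AE|IA|IO|EA', text): the regex engine scans left to right,
-- at each position trying the (all length-2) alternatives, advancing past a match.
def pvMatches : List Char → Int
  | a :: b :: rest => if pvIsDigraph a b then 1 + pvMatches rest else pvMatches (b :: rest)
  | _ => 0

def count_effective_letters_alt (text : String) : Int :=
  let u := (PySem.Str.upper text).toList
  (u.length : Int) - pvMatches u

-- ===== PRECONDITION & SPEC =====
def Spec_count_effective_letters (text : String) (out : Int) : Prop := out = count_effective_letters_alt text
instance (text : String) (out : Int) : Decidable (Spec_count_effective_letters text out) := by unfold Spec_count_effective_letters; infer_instance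

-- ===== CLAIM (what is proved, stated in full; the proofs are below) =====
def Claim_equal_count_effective_letters : Prop := ∀ (text : String), Dom_count_effective_letters text → Spec_count_effective_letters text (count_effective_letters text)

-- ===== LEMMAS AND PROOFS =====
theorem pvLoopA_eq (cs : List Char) (count : Int) : pvLoopA cs count = count + (cs.length : Int) - pvMatches cs := by
  fun_induction pvLoopA cs count with
  | case1 a b rest c h ih => simp [pvMatches, h, ih]; ring
  | case2 a b rest c h ih => simp [pvMatches, h, ih]; ring
  | case3 x c => simp [pvMatches]
  | case4 c => simp [pvMatches]

-- ===== VERDICT (by name: the statement is the Claim_ definition above) =====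
theorem count_effective_letters_spec : Claim_equal_count_effective_letters := by
  intro text _
  unfold Spec_count_effective_letters count_effective_letters count_effective_letters_alt
  simp [pvLoopA_eq]
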